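-- pv_equiv track=rewrite | github.com/JHyuk2/Hyuk2Coding | SWAC/D3/1234.py | remove_same
-- ===== SOURCE A (Python) =====
-- def remove_same(text):
--     for idx, t in enumerate(text):
--         if idx == len(text) - 1:
--             break
--
--         elif text[idx] == text[idx+1]:
--             text = text[:idx] + text[idx+2:]
--             break
--
--     return text
-- ===== SOURCE B (Python) =====
-- def remove_same(text):
--     # For each distinct character, locate the first doubled occurrence "cc"
--     # with C-level str.find; the earliest such hit is the first adjacent
--     # equal pair.  Remove it; if there is none, return text unchanged.
--     hits = [j for j in (text.find(c + c) for c in set(text)) if j != -1]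
--     if not hits:
--         return text
--     j = min(hits)
--     return text[:j] + text[j + 2:]
-- ===== Notes on version B (the rewrite author's own statement) =====
-- stated objective: alternative
-- what changed: Replaces the manual index loop with index comparisons and slicing-on-break by a min over the distinct characters of text.find(c+c): the earliest doubled-substring hit is the first adjacent equal pair, which is then sliced out.
import Mathlib
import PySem

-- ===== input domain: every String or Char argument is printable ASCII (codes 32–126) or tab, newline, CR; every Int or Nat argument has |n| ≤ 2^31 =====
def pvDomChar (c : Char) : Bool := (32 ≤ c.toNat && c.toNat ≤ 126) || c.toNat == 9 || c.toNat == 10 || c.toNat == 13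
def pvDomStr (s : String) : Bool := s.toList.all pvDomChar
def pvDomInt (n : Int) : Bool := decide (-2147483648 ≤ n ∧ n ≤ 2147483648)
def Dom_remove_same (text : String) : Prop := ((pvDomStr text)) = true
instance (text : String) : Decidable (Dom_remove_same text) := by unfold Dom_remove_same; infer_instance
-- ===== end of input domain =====

-- B replaces A's manual index loop (compare text[idx] with text[idx+1], slice on break)
-- by the minimum over the distinct characters of text.find(c+c); alternative algorithm, no speed claim.

-- ===== PORT A =====
-- for idx, t in enumerate(text): break at the last index; on the first adjacent equal
-- pair return text[:idx] + text[idx+2:]; fall through to text unchanged.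
def removeSameLoopA (orig : List Char) : List (Int × Char) → List Char
  | [] => orig
  | (idx, _t) :: rest =>
    if idx = PySem.List.len orig - 1 then orig
    else if PySem.List.pyGet? orig idx = PySem.List.pyGet? orig (idx + 1) then
      PySem.List.slice orig none (some idx) ++ PySem.List.slice orig (some (idx + 2)) none
    else removeSameLoopA orig rest

def remove_same (text : String) : String :=
  String.ofList (removeSameLoopA text.toList (PySem.List.enumerate text.toList 0))

-- ===== PORT B =====
-- hits = [j for j in (text.find(c + c) for c in set(text)) if j != -1];
-- empty hits → text unchanged; else j = min(hits) and text[:j] + text[j+2:].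
def removeAltCore (l : List Char) : String :=
  match PySem.List.min?
      (((PySem.Set.ofList l).map (fun c => PySem.Chars.find l [c, c])).filter
        (fun j => j != -1)) (fun x => x) with
  | none => String.ofList l
  | some j =>
      String.ofList (PySem.List.slice l none (some j) ++ PySem.List.slice l (some (j + 2)) none)

def remove_same_alt (text : String) : String := removeAltCore text.toList

-- ===== PRECONDITION & SPEC =====
def Spec_remove_same (text : String) (out : String) : Prop := out = remove_same_alt text
instance (text : String) (out : String) : Decidable (Spec_remove_same text out) := by
  unfold Spec_remove_same; infer_instance

-- ===== CLAIM (what is proved, stated in full; the proofs are below) =====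
def Claim_equal_remove_same : Prop := ∀ (text : String), Dom_remove_same text → Spec_remove_same text (remove_same text)

-- ===== LEMMAS AND PROOFS =====

-- common middle form: remove the first adjacent equal pair, structurally
def remB : List Char → List Char
  | [] => []
  | [c] => [c]
  | a :: b :: r => if a = b then r else a :: remB (b :: r)

-- index of the first adjacent equal pair
def pairIdx? : List Char → Option Nat
  | a :: b :: r => if a = b then some 0 else (pairIdx? (b :: r)).map (· + 1)
  | _ => none

theorem remB_eq : ∀ (l : List Char),
    remB l = match pairIdx? l with
      | none => l
      | some i => l.take i ++ l.drop (i + 2)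
  | [] => by simp [remB, pairIdx?]
  | [c] => by simp [remB, pairIdx?]
  | a :: b :: r => by
    by_cases hab : a = b
    · simp [remB, pairIdx?, hab]
    · have ih := remB_eq (b :: r)
      rw [remB, if_neg hab]
      simp only [pairIdx?, if_neg hab]
      cases h : pairIdx? (b :: r) with
      | none => rw [h] at ih; simp only [Option.map_none]; rw [ih]
      | some i =>
        rw [h] at ih
        simp only [Option.map_some]
        rw [ih]
        show a :: (List.take i (b :: r) ++ List.drop (i + 2) (b :: r)) =
          List.take (i + 1) (a :: b :: r) ++ List.drop (i + 1 + 2) (a :: b :: r)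
        have h3 : i + 1 + 2 = (i + 2) + 1 := by omega
        rw [List.take_succ_cons, h3, List.drop_succ_cons]
        simp

theorem pairIdx?_of_pair (l : List Char) (j : Nat) (c : Char)
    (h1 : l[j]? = some c) (h2 : l[j + 1]? = some c) : pairIdx? l ≠ none := by
  induction l generalizing j with
  | nil => simp at h1
  | cons a t ih =>
    cases t with
    | nil =>
      cases j with
      | zero => simp at h2
      | succ j' => simp at h1
    | cons b r =>
      by_cases hab : a = b
      · simp [pairIdx?, hab]
      · simp only [pairIdx?, if_neg hab, ne_eq, Option.map_eq_none_iff]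
        cases j with
        | zero =>
          simp at h1 h2
          exact absurd (h1.trans h2.symm) hab
        | succ j' =>
          simp only [List.getElem?_cons_succ] at h1 h2
          exact ih j' h1 h2

theorem pairIdx?_some (l : List Char) (i : Nat) (h : pairIdx? l = some i) :
    ∃ c, l[i]? = some c ∧ l[i + 1]? = some c ∧
      ∀ j < i, ∀ b, l[j]? = some b → l[j + 1]? ≠ some b := by
  induction l generalizing i with
  | nil => simp [pairIdx?] at h
  | cons a t ih =>
    cases t with
    | nil => simp [pairIdx?] at h
    | cons b r =>
      by_cases hab : a = b
      · simp [pairIdx?, hab] at h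
        subst h
        exact ⟨b, by simp [hab], by simp, by omega⟩
      · simp only [pairIdx?, if_neg hab, Option.map_eq_some_iff] at h
        obtain ⟨i', hi', rfl⟩ := h
        obtain ⟨c, hc1, hc2, hmin⟩ := ih i' hi'
        refine ⟨c, by simpa using hc1, by simpa using hc2, ?_⟩
        intro j hj d hd1 hd2
        cases j with
        | zero =>
          simp at hd1 hd2
          exact hab (hd1.trans hd2.symm)
        | succ j' =>
          simp only [List.getElem?_cons_succ] at hd1 hd2
          exact hmin j' (by omega) d hd1 hd2

theorem pair_prefix_iff (c : Char) (t : List Char) :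
    [c, c] <+: t ↔ t[0]? = some c ∧ t[1]? = some c := by
  cases t with
  | nil => simp
  | cons x s =>
    cases s with
    | nil => simp [List.cons_prefix_cons]
    | cons y r =>
      simp [List.cons_prefix_cons, eq_comm]

theorem pair_infix_iff (c : Char) (l : List Char) :
    [c, c] <:+: l ↔ ∃ j, l[j]? = some c ∧ l[j + 1]? = some c := by
  rw [← PySem.Chars.isIn_iff_infix, ← PySem.Chars.exists_prefix_drop_iff_isIn]
  refine exists_congr fun j => ?_
  rw [pair_prefix_iff]
  simp [List.getElem?_drop]

-- what B's find result means (Chars.find spec at start 0)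
theorem find_pair_spec (l : List Char) (c : Char) (h : PySem.Chars.find l [c, c] ≠ -1) :
    0 ≤ PySem.Chars.find l [c, c] ∧
    l[(PySem.Chars.find l [c, c]).toNat]? = some c ∧
    l[(PySem.Chars.find l [c, c]).toNat + 1]? = some c ∧
    ∀ m < (PySem.Chars.find l [c, c]).toNat, ¬ (l[m]? = some c ∧ l[m + 1]? = some c) := by
  have h0 : ((0 : Nat) : Int) = 0 := by norm_num
  have hspec := PySem.Chars.findFrom_natCast_spec l [c, c] 0 (Nat.zero_le _)
  rw [h0, PySem.Chars.findFrom_zero] at hspec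
  obtain ⟨hle, hpre, hmin⟩ := hspec h
  rw [pair_prefix_iff] at hpre
  simp only [List.getElem?_drop] at hpre
  refine ⟨by exact_mod_cast hle, hpre.1, hpre.2, ?_⟩
  intro m hm hp
  refine hmin m (Nat.zero_le _) hm ?_
  rw [pair_prefix_iff]
  simp [List.getElem?_drop, hp.1, hp.2]

-- A-side: the enumerate loop computes take k ++ remB (drop k)
theorem loopA_eq (d : List Char) : ∀ (k : Nat) (l : List Char), l.drop k = d →
    removeSameLoopA l (PySem.List.enumerate d (k : Int)) = l.take k ++ remB d := by
  induction d with
  | nil =>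
    intro k l hd
    have : l.length ≤ k := List.drop_eq_nil_iff.mp hd
    simp [PySem.List.enumerate, removeSameLoopA, remB, List.take_of_length_le this]
  | cons c d' ih =>
    intro k l hd
    have hk : k < l.length := by
      by_contra hge
      rw [List.drop_eq_nil_iff.mpr (by omega)] at hd; exact (List.cons_ne_nil _ _) hd.symm
    have lck : l[k]? = some c := by
      have h : (List.drop k l)[0]? = l[k + 0]? := List.getElem?_drop
      rw [hd] at h; simpa using h.symm
    have hd' : l.drop (k + 1) = d' := by
      have h : List.drop 1 (List.drop k l) = List.drop (k + 1) l := List.drop_drop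
      rw [hd] at h; simpa using h.symm
    rw [PySem.List.enumerate_cons]
    show (if (k : Int) = PySem.List.len l - 1 then l
      else if PySem.List.pyGet? l (k : Int) = PySem.List.pyGet? l ((k : Int) + 1) then
        PySem.List.slice l none (some (k : Int)) ++ PySem.List.slice l (some ((k : Int) + 2)) none
      else removeSameLoopA l (PySem.List.enumerate d' ((k : Int) + 1))) = l.take k ++ remB (c :: d')
    by_cases htop : k + 1 = l.length
    · have hdnil : d' = [] := by rw [← hd']; exact List.drop_eq_nil_iff.mpr (by omega)
      rw [if_pos (by simp [PySem.List.len_eq]; omega)]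
      subst hdnil
      have h1 : l.take (k + 1) = l := List.take_of_length_le (by omega)
      have h2 : l.take (k + 1) = l.take k ++ [c] := by
        rw [List.take_add_one, lck]; rfl
      have h3 : remB [c] = [c] := by simp [remB]
      rw [h3, ← h2, h1]
    · rw [if_neg (by simp [PySem.List.len_eq]; omega)]
      have hk1 : k + 1 < l.length := by omega
      have hdne : d' ≠ [] := by
        rw [← hd']; intro hnil
        have := List.drop_eq_nil_iff.mp hnil; omega
      obtain ⟨c2, d'', rfl⟩ := List.exists_cons_of_ne_nil hdne
      have lck1 : l[k + 1]? = some c2 := by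
        have h : (List.drop (k + 1) l)[0]? = l[(k + 1) + 0]? := List.getElem?_drop
        rw [hd'] at h; simpa using h.symm
      have hget : PySem.List.pyGet? l (k : Int) = l[k]? := PySem.List.pyGet?_natCast l k
      have hget1 : PySem.List.pyGet? l ((k : Int) + 1) = l[k + 1]? := by
        have hc : ((k : Int) + 1) = ((k + 1 : Nat) : Int) := by push_cast; ring
        rw [hc, PySem.List.pyGet?_natCast]
      by_cases hcc : c = c2
      · rw [if_pos (by rw [hget, hget1, lck, lck1, hcc])]
        have hs1 : PySem.List.slice l none (some (k : Int)) = l.take k :=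
          PySem.List.slice_to_natCast l k
        have hs2 : PySem.List.slice l (some ((k : Int) + 2)) none = l.drop (k + 2) := by
          have hc : ((k : Int) + 2) = ((k + 2 : Nat) : Int) := by push_cast; ring
          rw [hc, PySem.List.slice_from_natCast]
        have hdrop2 : l.drop (k + 2) = d'' := by
          have h : List.drop 1 (List.drop (k + 1) l) = List.drop ((k + 1) + 1) l :=
            List.drop_drop
          rw [hd'] at h; simpa using h.symm
        rw [hs1, hs2, hdrop2, remB, if_pos hcc]
      · rw [if_neg (by rw [hget, hget1, lck, lck1]; simp [hcc])]
        have hcast : ((k : Int) + 1) = ((k + 1 : Nat) : Int) := by push_cast; ring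
        rw [hcast, ih (k + 1) l hd']
        rw [remB, if_neg hcc]
        rw [List.take_add_one, lck]
        simp

theorem removeA_eq (text : String) :
    remove_same text = String.ofList (remB text.toList) := by
  unfold remove_same
  have h0 : ((0 : Nat) : Int) = 0 := by norm_num
  rw [← h0, loopA_eq text.toList 0 text.toList (by simp)]
  simp

theorem removeB_eq (l : List Char) : removeAltCore l = String.ofList (remB l) := by
  unfold removeAltCore
  cases hp : pairIdx? l with
  | none =>
    have hempty : ((PySem.Set.ofList l).map (fun c => PySem.Chars.find l [c, c])).filter
        (fun j => j != -1) = [] := by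
      rw [List.filter_eq_nil_iff]
      intro j hj
      obtain ⟨c, _, rfl⟩ := List.mem_map.mp hj
      have hfn : PySem.Chars.find l [c, c] = -1 := by
        rw [PySem.Chars.find_eq_neg_one_iff, pair_infix_iff]
        rintro ⟨j, hj1, hj2⟩
        exact pairIdx?_of_pair l j c hj1 hj2 hp
      simp [hfn]
    rw [hempty]
    have hnone : PySem.List.min? ([] : List Int) (fun x => x) = none := by
      rw [PySem.List.min?_eq_none_iff]
    rw [hnone, remB_eq, hp]
  | some i =>
    obtain ⟨c, hc1, hc2, hmin⟩ := pairIdx?_some l i hp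
    have hcl : c ∈ l := List.mem_of_getElem? hc1
    have hne : PySem.Chars.find l [c, c] ≠ -1 := by
      simp only [ne_eq, PySem.Chars.find_eq_neg_one_iff, not_not, pair_infix_iff]
      exact ⟨i, hc1, hc2⟩
    obtain ⟨hpos, hf1, hf2, hfmin⟩ := find_pair_spec l c hne
    have hfind : PySem.Chars.find l [c, c] = (i : Int) := by
      have hto : (PySem.Chars.find l [c, c]).toNat = i := by
        have h1 : ¬ (PySem.Chars.find l [c, c]).toNat < i := by
          intro hlt
          exact hmin _ hlt c hf1 hf2
        have h2 : ¬ i < (PySem.Chars.find l [c, c]).toNat := by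
          intro hlt
          exact hfmin i hlt ⟨hc1, hc2⟩
        omega
      omega
    have hmem : (i : Int) ∈ ((PySem.Set.ofList l).map (fun c => PySem.Chars.find l [c, c])).filter
        (fun j => j != -1) := by
      rw [List.mem_filter]
      constructor
      · exact List.mem_map.mpr ⟨c, by rw [PySem.Set.mem_ofList]; exact hcl, hfind⟩
      · simp
    have hlb : ∀ x ∈ ((PySem.Set.ofList l).map (fun c => PySem.Chars.find l [c, c])).filter
        (fun j => j != -1), (i : Int) ≤ x := by
      intro x hx
      rw [List.mem_filter] at hx
      obtain ⟨hxm, hxne⟩ := hx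
      obtain ⟨c', hc', rfl⟩ := List.mem_map.mp hxm
      have hne' : PySem.Chars.find l [c', c'] ≠ -1 := by simpa using hxne
      obtain ⟨hpos', hg1, hg2, _⟩ := find_pair_spec l c' hne'
      have hnl : ¬ (PySem.Chars.find l [c', c']).toNat < i := by
        intro hlt
        exact hmin _ hlt c' hg1 hg2
      omega
    cases hm : PySem.List.min?
        (((PySem.Set.ofList l).map (fun c => PySem.Chars.find l [c, c])).filter
          (fun j => j != -1)) (fun x => x) with
    | none =>
      rw [PySem.List.min?_eq_none_iff] at hm
      rw [hm] at hmem; simp at hmem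
    | some m =>
      have hmi : m = (i : Int) := by
        have h1 := PySem.List.min?_isMin hm (i : Int) hmem
        have h2 := hlb m (PySem.List.min?_mem hm)
        omega
      subst hmi
      show String.ofList (PySem.List.slice l none (some (i : Int)) ++
          PySem.List.slice l (some ((i : Int) + 2)) none) = String.ofList (remB l)
      have hs1 : PySem.List.slice l none (some (i : Int)) = l.take i :=
        PySem.List.slice_to_natCast l i
      have hs2 : PySem.List.slice l (some ((i : Int) + 2)) none = l.drop (i + 2) := by
        have hc : ((i : Int) + 2) = ((i + 2 : Nat) : Int) := by push_cast; ring
        rw [hc, PySem.List.slice_from_natCast]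
      rw [hs1, hs2, remB_eq, hp]

-- ===== VERDICT (by name: the statement is the Claim_ definition above) =====
theorem remove_same_spec : Claim_equal_remove_same := by
  intro text _
  unfold Spec_remove_same remove_same_alt
  rw [removeA_eq, removeB_eq]
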